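-- pv_equiv track=rewrite | github.com/ejwillemse/mcarptif | solver/py_solution_builders.py | insert_IFs_depot
-- ===== SOURCE A (Python) =====
-- def insert_IFs_depot(route, if_arc, depot):
--     for i, trip in enumerate(route):#route[1]:
--         if i == 0: route[0].insert(0, depot)
--         if i == (len(route) - 1):
--             route[i].append(if_arc[trip[-1]][depot])
--             route[i].append(depot)
--         if (i > 0):
--             if_arc_add = if_arc[route[i-1][-1]][trip[0]]
--             route[i-1].append(if_arc_add)
--             route[i].insert(0, if_arc_add)
--     return(route)
-- ===== SOURCE B (Python) =====
-- def insert_IFs_depot(route, if_arc, depot):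
--     # Functional rebuild: precompute trip ends and the inter-trip IF connectors once,
--     # then assemble each augmented trip with one comprehension.
--     # NOTE: unlike the original, this returns fresh lists and does not mutate `route`.
--     if not route:
--         return route
--     trips = [[depot] + route[0]] + route[1:]
--     ends = [t[-1] for t in trips]
--     conns = [if_arc[ends[j]][route[j + 1][0]] for j in range(len(route) - 1)]
--     out = [([conns[j - 1]] if j > 0 else []) + trips[j]
--            + ([conns[j]] if j < len(conns) else [])
--            for j in range(len(trips))]
--     out[-1] = out[-1] + [if_arc[ends[-1]][depot], depot]
--     return out
-- ===== Notes on version B (the rewrite author's own statement) =====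
-- stated objective: simpler
-- what changed: Replaces the indexed in-place mutation loop with three branch-order-sensitive cases by a functional rebuild: precompute trip ends and the inter-trip IF connectors once, then assemble every augmented trip with a single comprehension (B returns fresh lists instead of mutating route in place).
import Mathlib
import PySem

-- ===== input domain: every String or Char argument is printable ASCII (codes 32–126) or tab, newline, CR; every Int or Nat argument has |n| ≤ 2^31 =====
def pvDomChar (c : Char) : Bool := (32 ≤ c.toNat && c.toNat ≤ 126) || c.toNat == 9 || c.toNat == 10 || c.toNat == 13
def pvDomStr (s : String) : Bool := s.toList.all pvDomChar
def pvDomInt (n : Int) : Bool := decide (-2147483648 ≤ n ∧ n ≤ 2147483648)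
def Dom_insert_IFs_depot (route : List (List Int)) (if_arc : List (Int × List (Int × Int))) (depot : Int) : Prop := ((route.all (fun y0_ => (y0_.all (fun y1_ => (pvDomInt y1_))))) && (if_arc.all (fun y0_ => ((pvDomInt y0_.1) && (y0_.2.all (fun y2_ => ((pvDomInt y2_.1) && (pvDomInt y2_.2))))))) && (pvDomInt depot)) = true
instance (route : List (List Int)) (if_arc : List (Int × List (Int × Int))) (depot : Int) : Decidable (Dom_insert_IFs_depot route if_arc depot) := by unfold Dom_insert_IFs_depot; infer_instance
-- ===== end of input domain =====

-- B rebuilds the routes functionally (trip ends and IF connectors precomputed, one comprehension)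
-- instead of A's indexed in-place mutation loop; equivalence is about the RETURN value only:
-- Python A mutates the trip lists of `route` in place, Python B returns fresh lists.

-- ===== PORT A =====
-- if_arc[x][y] : dict-of-dicts lookup, first match on the association lists; total form with
-- default 0/[] — under Pre_ every lookup succeeds (shared by both ports: both Pythons write
-- the same `if_arc[x][y]` expression).
def pvLk (if_arc : List (Int × List (Int × Int))) (x y : Int) : Int :=
  (((List.lookup x if_arc).getD []).lookup y).getD 0

-- One iteration of A's `for i, trip in enumerate(route)` body; `trip` aliases route[i], so it is
-- read from the CURRENT state r.  Branches in A's order: i==0, i==len(route)-1, i>0.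
def pvStepA (if_arc : List (Int × List (Int × Int))) (depot : Int) (n : Nat)
    (r : List (List Int)) (i : Nat) : List (List Int) :=
  let r := if i = 0 then r.set 0 (depot :: r.getD 0 []) else r
  let r := if i = n - 1 then
      let v := pvLk if_arc (PySem.List.pyGetD (r.getD i []) (-1) 0) depot
      let r := r.set i (r.getD i [] ++ [v])
      r.set i (r.getD i [] ++ [depot])
    else r
  if 0 < i then
    let a := pvLk if_arc (PySem.List.pyGetD (r.getD (i - 1) []) (-1) 0)
              (PySem.List.pyGetD (r.getD i []) 0 0)
    let r := r.set (i - 1) (r.getD (i - 1) [] ++ [a])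
    r.set i (a :: r.getD i [])
  else r

def insert_IFs_depot (route : List (List Int)) (if_arc : List (Int × List (Int × Int))) (depot : Int) : List (List Int) :=
  (List.range route.length).foldl (pvStepA if_arc depot route.length) route

-- ===== PORT B =====
-- Source B's local variables trips / ends / conns / out, as named helpers
def pvTrips (route : List (List Int)) (depot : Int) : List (List Int) :=
  (depot :: route.headD []) :: route.tail

def pvEnds (route : List (List Int)) (depot : Int) : List Int :=
  (pvTrips route depot).map (fun t => PySem.List.pyGetD t (-1) 0)

def pvConns (route : List (List Int)) (if_arc : List (Int × List (Int × Int))) (depot : Int) : List Int :=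
  (List.range (route.length - 1)).map (fun j =>
    pvLk if_arc ((pvEnds route depot).getD j 0) (PySem.List.pyGetD (route.getD (j + 1) []) 0 0))

def pvOut (route : List (List Int)) (if_arc : List (Int × List (Int × Int))) (depot : Int) : List (List Int) :=
  (List.range (pvTrips route depot).length).map (fun j =>
    (if 0 < j then [(pvConns route if_arc depot).getD (j - 1) 0] else [])
      ++ (pvTrips route depot).getD j []
      ++ (if j < (pvConns route if_arc depot).length
          then [(pvConns route if_arc depot).getD j 0] else []))

def insert_IFs_depot_alt (route : List (List Int)) (if_arc : List (Int × List (Int × Int))) (depot : Int) : List (List Int) :=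
  if route = [] then route
  else
    (pvOut route if_arc depot).set ((pvOut route if_arc depot).length - 1)
      ((pvOut route if_arc depot).getD ((pvOut route if_arc depot).length - 1) [] ++
        [pvLk if_arc (PySem.List.pyGetD (pvEnds route depot) (-1) 0) depot, depot])

-- ===== PRECONDITION & SPEC =====
-- last element used by A when it looks up the connector leaving trip j (depot stands in for an
-- empty first trip, into which A has already inserted the depot)
def pvEnd (route : List (List Int)) (depot : Int) (j : Nat) : Int :=
  if j = 0 then (route.getD 0 []).getLastD depot else (route.getD j []).getLastD 0

def pvLkOk (if_arc : List (Int × List (Int × Int))) (x y : Int) : Bool :=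
  ((List.lookup x if_arc).bind (fun d => List.lookup y d)).isSome

-- Pre_ = exactly the inputs where Python A returns: every trip after the first is nonempty
-- (else trip[0]/trip[-1] raises IndexError) and every if_arc[..][..] lookup A performs hits an
-- existing key (else KeyError).
def Pre_insert_IFs_depot (route : List (List Int)) (if_arc : List (Int × List (Int × Int))) (depot : Int) : Prop :=
  (∀ t ∈ route.tail, t ≠ []) ∧
  (∀ j ∈ List.range (route.length - 1),
      pvLkOk if_arc (pvEnd route depot j) ((route.getD (j + 1) []).headD 0) = true) ∧
  (route ≠ [] → pvLkOk if_arc (pvEnd route depot (route.length - 1)) depot = true)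
instance (route : List (List Int)) (if_arc : List (Int × List (Int × Int))) (depot : Int) : Decidable (Pre_insert_IFs_depot route if_arc depot) := by unfold Pre_insert_IFs_depot; infer_instance

def pvWitness_insert_IFs_depot : List (List Int) × (List (Int × List (Int × Int))) × Int :=
  ([[1], [2]], [(1, [(2, 5)]), (2, [(0, 7)])], 0)

def Spec_insert_IFs_depot (route : List (List Int)) (if_arc : List (Int × List (Int × Int))) (depot : Int) (out : List (List Int)) : Prop := out = insert_IFs_depot_alt route if_arc depot
instance (route : List (List Int)) (if_arc : List (Int × List (Int × Int))) (depot : Int) (out : List (List Int)) : Decidable (Spec_insert_IFs_depot route if_arc depot out) := by unfold Spec_insert_IFs_depot; infer_instance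

-- ===== CLAIM (what is proved, stated in full; the proofs are below) =====
def Claim_equal_insert_IFs_depot : Prop := ∀ (route : List (List Int)) (if_arc : List (Int × List (Int × Int))) (depot : Int), Dom_insert_IFs_depot route if_arc depot → Pre_insert_IFs_depot route if_arc depot → Spec_insert_IFs_depot route if_arc depot (insert_IFs_depot route if_arc depot)

-- ===== LEMMAS AND PROOFS =====

-- connector value inserted in front of trip j (j ≥ 1)
def pvC (route : List (List Int)) (if_arc : List (Int × List (Int × Int))) (depot : Int) (j : Nat) : Int :=
  pvLk if_arc (pvEnd route depot (j - 1)) (PySem.List.pyGetD (route.getD j []) 0 0)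

-- trip j with its leading insertion done (depot for j = 0, connector for j ≥ 1)
def pvG (route : List (List Int)) (if_arc : List (Int × List (Int × Int))) (depot : Int) (j : Nat) : List Int :=
  if j = 0 then depot :: route.getD 0 [] else pvC route if_arc depot j :: route.getD j []

-- fully finished non-final trip j
def pvF (route : List (List Int)) (if_arc : List (Int × List (Int × Int))) (depot : Int) (j : Nat) : List Int :=
  pvG route if_arc depot j ++ [pvC route if_arc depot (j + 1)]

theorem pv_getD_append_length {α : Type} (pre : List α) (x : α) (l : List α) (d : α) :
    (pre ++ x :: l).getD pre.length d = x := by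
  induction pre with
  | nil => rfl
  | cons a as ih => simp only [List.length_cons, List.cons_append]; exact ih

theorem pv_set_append_length {α : Type} (pre : List α) (x y : α) (l : List α) :
    (pre ++ x :: l).set pre.length y = pre ++ y :: l := by
  induction pre with
  | nil => rfl
  | cons a as ih => simp [ih]

theorem pv_getD_map_range {α : Type} (f : Nat → α) (m j : Nat) (d : α) (h : j < m) :
    ((List.range m).map f).getD j d = f j := by
  rw [List.getD_eq_getElem?_getD]
  simp [List.getElem?_map, List.getElem?_range h]

theorem pv_getD_map {α β : Type} (f : α → β) (l : List α) (j : Nat) (d : β) (d' : α)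
    (h : j < l.length) : (l.map f).getD j d = f (l.getD j d') := by
  rw [List.getD_eq_getElem?_getD, List.getD_eq_getElem?_getD]
  simp [List.getElem?_map, List.getElem?_eq_getElem h]

theorem pv_getD_cons_succ {α : Type} (a : α) (l : List α) (j : Nat) (d : α) :
    (a :: l).getD (j + 1) d = l.getD j d := by
  simp [List.getD_eq_getElem?_getD]

theorem pv_getLastD_of_ne {α : Type} (l : List α) (d d' : α) (h : l ≠ []) :
    l.getLastD d = l.getLastD d' := by
  cases l with
  | nil => exact absurd rfl h
  | cons a as => rw [List.getLastD_cons, List.getLastD_cons]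

theorem pv_getLastD_getD {α : Type} (l : List α) (d : α) (_h : l ≠ []) :
    l.getLastD d = l.getD (l.length - 1) d := by
  rw [List.getD_eq_getElem?_getD, List.getLastD_eq_getLast?]
  rw [List.getLast?_eq_getElem?]

theorem pv_pyGetD_neg_one {α : Type} (l : List α) (d : α) :
    PySem.List.pyGetD l (-1) d = l.getLastD d := by
  cases l with
  | nil => simp [PySem.List.pyGetD, PySem.List.pyGet?]
  | cons a as =>
    rw [PySem.List.pyGetD_neg_one (a :: as) d (by simp)]
    rw [List.getLastD_eq_getLast?, List.getLast?_eq_some_getLast (by simp)]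
    rfl

theorem pv_pyGetD_zero_of_ne {α : Type} (t l : List α) (d : α) (h : t ≠ []) :
    PySem.List.pyGetD (t ++ l) 0 d = PySem.List.pyGetD t 0 d := by
  cases t with
  | nil => exact absurd rfl h
  | cons a as =>
    have hpos : (0 : Int) ≤ (as.length : Int) + (l.length : Int) := by positivity
    simp [PySem.List.pyGetD, PySem.List.pyGet?, PySem.List.pyIdx?, hpos]

theorem pv_tail_ne (route : List (List Int)) (hne : ∀ t ∈ route.tail, t ≠ [])
    (j : Nat) (h1 : 1 ≤ j) (hj : j < route.length) : route.getD j [] ≠ [] := by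
  apply hne
  rw [List.getD_eq_getElem?_getD, List.getElem?_eq_getElem hj]
  have hmem : route[j] ∈ route.tail := by
    cases route with
    | nil => simp at hj
    | cons t0 tl =>
      simp only [List.tail_cons]
      rcases Nat.exists_eq_add_of_le h1 with ⟨k, rfl⟩
      have hk : k < tl.length := by simp at hj; omega
      have hgk : (t0 :: tl)[1 + k]'(by simpa using hj) = tl[k]'hk := by
        simp [Nat.add_comm 1 k]
      rw [hgk]
      exact List.getElem_mem _
  simpa using hmem

-- the last element A reads from the front-done trip j is pvEnd j
theorem pv_pyLast_g (route : List (List Int)) (if_arc : List (Int × List (Int × Int))) (depot : Int)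
    (hne : ∀ t ∈ route.tail, t ≠ []) (j : Nat) (hj : j < route.length) :
    PySem.List.pyGetD (pvG route if_arc depot j) (-1) 0 = pvEnd route depot j := by
  unfold pvG pvEnd
  by_cases hj0 : j = 0
  · subst hj0
    rw [if_pos rfl, if_pos rfl, pv_pyGetD_neg_one, List.getLastD_cons]
  · rw [if_neg hj0, if_neg hj0, pv_pyGetD_neg_one, List.getLastD_cons]
    exact pv_getLastD_of_ne _ _ _ (pv_tail_ne route hne j (by omega) hj)

-- the last element read directly from an untouched trip j ≥ 1
theorem pv_pyLast_t (route : List (List Int)) (depot : Int) (j : Nat) (h1 : 1 ≤ j) :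
    PySem.List.pyGetD (route.getD j []) (-1) 0 = pvEnd route depot j := by
  unfold pvEnd
  rw [if_neg (by omega : ¬ j = 0), pv_pyGetD_neg_one]

-- equation lemmas for pvStepA in each index regime
theorem pvStepA_zero (if_arc : List (Int × List (Int × Int))) (depot : Int) (n : Nat)
    (r : List (List Int)) (h2 : 2 ≤ n) :
    pvStepA if_arc depot n r 0 = r.set 0 (depot :: r.getD 0 []) := by
  have h1 : ¬ ((0 : Nat) = n - 1) := by omega
  simp [pvStepA, h1]

theorem pvStepA_mid (if_arc : List (Int × List (Int × Int))) (depot : Int) (n : Nat)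
    (r : List (List Int)) (i : Nat) (h0 : 0 < i) (hl : ¬ (i = n - 1)) :
    pvStepA if_arc depot n r i =
      (r.set (i - 1) (r.getD (i - 1) [] ++
          [pvLk if_arc (PySem.List.pyGetD (r.getD (i - 1) []) (-1) 0)
            (PySem.List.pyGetD (r.getD i []) 0 0)])).set i
        (pvLk if_arc (PySem.List.pyGetD (r.getD (i - 1) []) (-1) 0)
            (PySem.List.pyGetD (r.getD i []) 0 0) ::
          (r.set (i - 1) (r.getD (i - 1) [] ++
            [pvLk if_arc (PySem.List.pyGetD (r.getD (i - 1) []) (-1) 0)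
              (PySem.List.pyGetD (r.getD i []) 0 0)])).getD i []) := by
  have h1 : ¬ (i = 0) := by omega
  simp [pvStepA, h1, hl, h0]

theorem pvStepA_last (if_arc : List (Int × List (Int × Int))) (depot : Int) (n : Nat)
    (r : List (List Int)) (i : Nat) (h0 : 0 < i) (hl : i = n - 1) :
    pvStepA if_arc depot n r i =
      (let v := pvLk if_arc (PySem.List.pyGetD (r.getD i []) (-1) 0) depot
       let r1 := r.set i (r.getD i [] ++ [v])
       let r2 := r1.set i (r1.getD i [] ++ [depot])
       let a := pvLk if_arc (PySem.List.pyGetD (r2.getD (i - 1) []) (-1) 0)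
                  (PySem.List.pyGetD (r2.getD i []) 0 0)
       let r3 := r2.set (i - 1) (r2.getD (i - 1) [] ++ [a])
       r3.set i (a :: r3.getD i [])) := by
  have h1 : (i = 0) = False := by simp; omega
  have h2 : (i = n - 1) = True := by simp [hl]
  have h3 : (0 < i) = True := by simp [h0]
  simp only [pvStepA, h1, h2, h3, if_true, if_false]

-- the invariant: after iterations 0..j (j strictly before the last index), the state is
-- finished trips 0..j-1, the front-done trip j, and the untouched suffix
theorem pv_invA (route : List (List Int)) (if_arc : List (Int × List (Int × Int))) (depot : Int)
    (hne : ∀ t ∈ route.tail, t ≠ []) :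
    ∀ (j : Nat), j + 1 < route.length →
      (List.range (j + 1)).foldl (pvStepA if_arc depot route.length) route =
        (List.range j).map (pvF route if_arc depot) ++
          pvG route if_arc depot j :: route.drop (j + 1) := by
  intro j
  induction j with
  | zero =>
    intro hj
    cases hr : route with
    | nil => rw [hr] at hj; simp at hj
    | cons t0 tl =>
      simp only [List.range_succ, List.range_zero, List.nil_append, List.foldl_cons,
        List.foldl_nil, List.map_nil]
      rw [← hr, pvStepA_zero if_arc depot route.length route (by omega)]
      rw [hr]
      simp [pvG]
  | succ j ih =>
    intro hj
    have hj' : j + 1 < route.length := by omega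
    rw [List.range_succ, List.foldl_append, List.foldl_cons, List.foldl_nil, ih hj']
    have hdrop : route.drop (j + 1) = route.getD (j + 1) [] :: route.drop (j + 2) := by
      rw [List.getD_eq_getElem?_getD, List.getElem?_eq_getElem hj']
      exact List.drop_eq_getElem_cons hj'
    rw [hdrop]
    set c := pvC route if_arc depot (j + 1) with hcdef
    set P := (List.range j).map (pvF route if_arc depot) with hP
    have hPlen : P.length = j := by simp [hP]
    set g := pvG route if_arc depot j with hg
    set t := route.getD (j + 1) [] with ht
    rw [pvStepA_mid if_arc depot route.length _ (j + 1) (by omega) (by omega)]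
    simp only [Nat.add_sub_cancel]
    have e1 : (P ++ g :: t :: route.drop (j + 2)).getD j [] = g := by
      rw [← hPlen]; exact pv_getD_append_length P g _ []
    rw [e1]
    have hc : pvLk if_arc (PySem.List.pyGetD g (-1) 0)
        (PySem.List.pyGetD ((P ++ g :: t :: route.drop (j + 2)).getD (j + 1) []) 0 0) = c := by
      have e2 : (P ++ g :: t :: route.drop (j + 2)).getD (j + 1) [] = t := by
        have hsplit : P ++ g :: t :: route.drop (j + 2) =
            (P ++ [g]) ++ t :: route.drop (j + 2) := by simp
        rw [hsplit, ← (by simp [hPlen] : (P ++ [g]).length = j + 1)]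
        exact pv_getD_append_length _ t _ []
      rw [e2, hcdef]
      unfold pvC
      rw [hg, pv_pyLast_g route if_arc depot hne j (by omega)]
      simp [ht]
    rw [hc]
    have s1 : (P ++ g :: t :: route.drop (j + 2)).set j (g ++ [c]) =
        P ++ (g ++ [c]) :: t :: route.drop (j + 2) := by
      rw [← hPlen]; exact pv_set_append_length P g _ _
    rw [s1]
    have e3 : (P ++ (g ++ [c]) :: t :: route.drop (j + 2)).getD (j + 1) [] = t := by
      have hsplit : P ++ (g ++ [c]) :: t :: route.drop (j + 2) =
          (P ++ [g ++ [c]]) ++ t :: route.drop (j + 2) := by simp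
      rw [hsplit, ← (by simp [hPlen] : (P ++ [g ++ [c]]).length = j + 1)]
      exact pv_getD_append_length _ t _ []
    rw [e3]
    have s2 : (P ++ (g ++ [c]) :: t :: route.drop (j + 2)).set (j + 1) (c :: t) =
        P ++ (g ++ [c]) :: (c :: t) :: route.drop (j + 2) := by
      have h4 : P ++ (g ++ [c]) :: t :: route.drop (j + 2) =
          (P ++ [g ++ [c]]) ++ t :: route.drop (j + 2) := by simp
      have h5 : P ++ (g ++ [c]) :: (c :: t) :: route.drop (j + 2) =
          (P ++ [g ++ [c]]) ++ (c :: t) :: route.drop (j + 2) := by simp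
      rw [h4, h5, ← (by simp [hPlen] : (P ++ [g ++ [c]]).length = j + 1)]
      exact pv_set_append_length _ t _ _
    rw [s2, List.range_succ, List.map_append, ← hP]
    have hf : pvF route if_arc depot j = g ++ [c] := by rw [pvF, ← hg, ← hcdef]
    have hgs : pvG route if_arc depot (j + 1) = c :: t := by
      rw [pvG, if_neg (by omega : ¬ j + 1 = 0), ← hcdef, ← ht]
    simp [hf, hgs]

-- closed form of port A for routes with at least two trips
theorem pv_A_closed (route : List (List Int)) (if_arc : List (Int × List (Int × Int))) (depot : Int)
    (hne : ∀ t ∈ route.tail, t ≠ []) (m : Nat) (hm : route.length = m + 2) :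
    insert_IFs_depot route if_arc depot =
      (List.range m).map (pvF route if_arc depot) ++
        [pvG route if_arc depot m ++ [pvC route if_arc depot (m + 1)],
         pvC route if_arc depot (m + 1) ::
           (route.getD (m + 1) [] ++
             [pvLk if_arc (pvEnd route depot (m + 1)) depot, depot])] := by
  unfold insert_IFs_depot
  rw [hm]
  have hrange : List.range (m + 2) = List.range (m + 1) ++ [m + 1] := List.range_succ
  rw [hrange, List.foldl_append, List.foldl_cons, List.foldl_nil, ← hm]
  rw [pv_invA route if_arc depot hne m (by omega)]
  have hdrop1 : route.drop (m + 1) = [route.getD (m + 1) []] := by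
    have h1 : m + 1 < route.length := by omega
    rw [List.getD_eq_getElem?_getD, List.getElem?_eq_getElem h1]
    rw [List.drop_eq_getElem_cons h1]
    simp [List.drop_eq_nil_of_le, hm]
  rw [hdrop1]
  set P := (List.range m).map (pvF route if_arc depot) with hP
  have hPlen : P.length = m := by simp [hP]
  set g := pvG route if_arc depot m with hg
  set t := route.getD (m + 1) [] with ht
  rw [pvStepA_last if_arc depot route.length _ (m + 1) (by omega) (by omega)]
  simp only [Nat.add_sub_cancel]
  have htne : t ≠ [] := by rw [ht]; exact pv_tail_ne route hne (m + 1) (by omega) (by omega)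
  have hsplit : P ++ g :: [t] = (P ++ [g]) ++ [t] := by simp
  have eT : (P ++ g :: [t]).getD (m + 1) [] = t := by
    rw [hsplit, ← (by simp [hPlen] : (P ++ [g]).length = m + 1)]
    exact pv_getD_append_length _ t [] []
  rw [eT]
  set v := pvLk if_arc (PySem.List.pyGetD t (-1) 0) depot with hv
  have sV : (P ++ g :: [t]).set (m + 1) (t ++ [v]) = P ++ g :: [t ++ [v]] := by
    rw [hsplit, ← (by simp [hPlen] : (P ++ [g]).length = m + 1)]
    rw [pv_set_append_length (P ++ [g]) t (t ++ [v]) []]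
    simp
  rw [sV]
  have eTV : (P ++ g :: [t ++ [v]]).getD (m + 1) [] = t ++ [v] := by
    rw [(by simp : P ++ g :: [t ++ [v]] = (P ++ [g]) ++ [t ++ [v]]),
      ← (by simp [hPlen] : (P ++ [g]).length = m + 1)]
    exact pv_getD_append_length _ _ [] []
  rw [eTV]
  have sVD : (P ++ g :: [t ++ [v]]).set (m + 1) ((t ++ [v]) ++ [depot]) =
      P ++ g :: [t ++ [v, depot]] := by
    rw [(by simp : P ++ g :: [t ++ [v]] = (P ++ [g]) ++ [t ++ [v]]),
      ← (by simp [hPlen] : (P ++ [g]).length = m + 1)]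
    rw [pv_set_append_length (P ++ [g]) (t ++ [v]) ((t ++ [v]) ++ [depot]) []]
    simp
  rw [sVD]
  have eG : (P ++ g :: [t ++ [v, depot]]).getD m [] = g := by
    rw [← hPlen]
    exact pv_getD_append_length _ _ _ []
  rw [eG]
  have eT2 : (P ++ g :: [t ++ [v, depot]]).getD (m + 1) [] = t ++ [v, depot] := by
    rw [(by simp : P ++ g :: [t ++ [v, depot]] = (P ++ [g]) ++ [t ++ [v, depot]]),
      ← (by simp [hPlen] : (P ++ [g]).length = m + 1)]
    exact pv_getD_append_length _ _ [] []
  rw [eT2]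
  have ha : pvLk if_arc (PySem.List.pyGetD g (-1) 0)
      (PySem.List.pyGetD (t ++ [v, depot]) 0 0) = pvC route if_arc depot (m + 1) := by
    rw [hg, pv_pyLast_g route if_arc depot hne m (by omega)]
    rw [pv_pyGetD_zero_of_ne t [v, depot] 0 htne]
    rw [pvC]
    simp [ht]
  rw [ha]
  set a := pvC route if_arc depot (m + 1) with hadef
  have sA : (P ++ g :: [t ++ [v, depot]]).set m (g ++ [a]) = P ++ (g ++ [a]) :: [t ++ [v, depot]] := by
    rw [← hPlen]
    exact pv_set_append_length P g (g ++ [a]) _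
  rw [sA]
  have eT3 : (P ++ (g ++ [a]) :: [t ++ [v, depot]]).getD (m + 1) [] = t ++ [v, depot] := by
    rw [(by simp : P ++ (g ++ [a]) :: [t ++ [v, depot]] = (P ++ [g ++ [a]]) ++ [t ++ [v, depot]]),
      ← (by simp [hPlen] : (P ++ [g ++ [a]]).length = m + 1)]
    exact pv_getD_append_length _ _ [] []
  rw [eT3]
  have sF : (P ++ (g ++ [a]) :: [t ++ [v, depot]]).set (m + 1) (a :: (t ++ [v, depot])) =
      P ++ (g ++ [a]) :: [a :: (t ++ [v, depot])] := by
    rw [(by simp : P ++ (g ++ [a]) :: [t ++ [v, depot]] = (P ++ [g ++ [a]]) ++ [t ++ [v, depot]]),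
      (by simp : P ++ (g ++ [a]) :: [a :: (t ++ [v, depot])] = (P ++ [g ++ [a]]) ++ [a :: (t ++ [v, depot])]),
      ← (by simp [hPlen] : (P ++ [g ++ [a]]).length = m + 1)]
    exact pv_set_append_length _ _ _ []
  rw [sF]
  have hvE : v = pvLk if_arc (pvEnd route depot (m + 1)) depot := by
    rw [hv, ht, pv_pyLast_t route depot (m + 1) (by omega)]
  rw [hvE]

-- ends[j] is pvEnd j
theorem pv_ends_getD (t0 : List Int) (tl : List (List Int)) (depot : Int) (j : Nat)
    (hj : j < tl.length + 1) :
    (pvEnds (t0 :: tl) depot).getD j 0 = pvEnd (t0 :: tl) depot j := by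
  unfold pvEnds pvTrips
  rw [pv_getD_map _ _ j 0 [] (by simp; omega)]
  cases j with
  | zero =>
    simp only [List.headD_cons, List.tail_cons, List.getD_cons_zero]
    rw [pv_pyGetD_neg_one, List.getLastD_cons]
    unfold pvEnd
    simp
  | succ k =>
    simp only [List.headD_cons, List.tail_cons]
    rw [pv_getD_cons_succ]
    rw [← pv_pyLast_t (t0 :: tl) depot (k + 1) (by omega)]
    congr 1

theorem pv_conns_getD (t0 : List Int) (tl : List (List Int))
    (if_arc : List (Int × List (Int × Int))) (depot : Int) (j : Nat) (hj : j < tl.length) :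
    (pvConns (t0 :: tl) if_arc depot).getD j 0 = pvC (t0 :: tl) if_arc depot (j + 1) := by
  unfold pvConns
  rw [pv_getD_map_range _ _ j 0 (by simp; omega)]
  rw [pv_ends_getD t0 tl depot j (by omega)]
  unfold pvC
  simp

-- closed form of port B for routes with at least two trips
theorem pv_B_closed (route : List (List Int)) (if_arc : List (Int × List (Int × Int))) (depot : Int)
    (hne : ∀ t ∈ route.tail, t ≠ []) (m : Nat) (hm : route.length = m + 2) :
    insert_IFs_depot_alt route if_arc depot =
      (List.range (m + 1)).map (pvF route if_arc depot) ++
        [pvC route if_arc depot (m + 1) ::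
           (route.getD (m + 1) [] ++
             [pvLk if_arc (pvEnd route depot (m + 1)) depot, depot])] := by
  obtain ⟨t0, tl, hr⟩ : ∃ t0 tl, route = t0 :: tl := by
    cases route with
    | nil => simp at hm
    | cons a l => exact ⟨a, l, rfl⟩
  subst hr
  have htl : tl.length = m + 1 := by simpa using hm
  unfold insert_IFs_depot_alt
  rw [if_neg (by simp)]
  have hconl : (pvConns (t0 :: tl) if_arc depot).length = m + 1 := by
    unfold pvConns
    simp [htl]
  have htrl : (pvTrips (t0 :: tl) depot).length = m + 2 := by
    unfold pvTrips
    simp [htl]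
  -- out before the last-trip closing
  have hout : pvOut (t0 :: tl) if_arc depot =
      (List.range (m + 1)).map (pvF (t0 :: tl) if_arc depot) ++
        [pvC (t0 :: tl) if_arc depot (m + 1) :: (t0 :: tl).getD (m + 1) []] := by
    unfold pvOut
    rw [htrl, (List.range_succ : List.range (m + 2) = List.range (m + 1) ++ [m + 1]),
      List.map_append]
    congr 1
    · apply List.map_congr_left
      intro j hjmem
      have hjlt : j < m + 1 := by simpa using hjmem
      unfold pvF pvG
      cases j with
      | zero =>
        rw [if_neg (by omega : ¬ (0:Nat) < 0), if_pos (by rw [hconl]; omega), if_pos rfl]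
        rw [pv_conns_getD t0 tl if_arc depot 0 (by omega)]
        unfold pvTrips
        simp
      | succ k =>
        rw [if_pos (by omega : 0 < k + 1), if_pos (by rw [hconl]; omega),
          if_neg (by omega : ¬ k + 1 = 0)]
        simp only [Nat.add_sub_cancel]
        rw [pv_conns_getD t0 tl if_arc depot k (by omega),
          pv_conns_getD t0 tl if_arc depot (k + 1) (by omega)]
        unfold pvTrips
        simp only [List.headD_cons, List.tail_cons]
        rw [pv_getD_cons_succ, pv_getD_cons_succ]
        simp
    · simp only [List.map_cons, List.map_nil]
      rw [if_pos (by omega : 0 < m + 1), if_neg (by rw [hconl]; omega)]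
      simp only [Nat.add_sub_cancel]
      rw [pv_conns_getD t0 tl if_arc depot m (by omega)]
      unfold pvTrips
      simp only [List.headD_cons, List.tail_cons]
      rw [pv_getD_cons_succ]
      simp
  rw [hout]
  set P := (List.range (m + 1)).map (pvF (t0 :: tl) if_arc depot) with hP
  set x := pvC (t0 :: tl) if_arc depot (m + 1) :: (t0 :: tl).getD (m + 1) [] with hx
  have hlen1 : (P ++ [x]).length - 1 = P.length := by simp
  rw [hlen1, pv_getD_append_length, pv_set_append_length]
  have hEnds : PySem.List.pyGetD (pvEnds (t0 :: tl) depot) (-1) 0 = pvEnd (t0 :: tl) depot (m + 1) := by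
    have hene : pvEnds (t0 :: tl) depot ≠ [] := by unfold pvEnds pvTrips; simp
    have helen : (pvEnds (t0 :: tl) depot).length = m + 2 := by
      unfold pvEnds pvTrips; simp [htl]
    rw [pv_pyGetD_neg_one, pv_getLastD_getD _ _ hene, helen,
      (by omega : m + 2 - 1 = m + 1)]
    exact pv_ends_getD t0 tl depot (m + 1) (by omega)
  rw [hEnds]
  simp [hx]

-- the zero- and one-trip cases
theorem pv_small (route : List (List Int)) (if_arc : List (Int × List (Int × Int))) (depot : Int)
    (hlen : route.length ≤ 1) :
    insert_IFs_depot route if_arc depot = insert_IFs_depot_alt route if_arc depot := by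
  cases route with
  | nil => simp [insert_IFs_depot, insert_IFs_depot_alt]
  | cons t0 tl =>
    have htl : tl = [] := by
      cases tl with
      | nil => rfl
      | cons a l => simp at hlen
    subst htl
    simp only [insert_IFs_depot, insert_IFs_depot_alt, List.length_cons, List.length_nil]
    rw [(by rfl : List.range (0 + 1) = [0]), List.foldl_cons, List.foldl_nil]
    simp only [pvStepA, pvOut, pvTrips, pvEnds, pvConns]
    norm_num
    rw [pv_pyGetD_neg_one, pv_pyGetD_neg_one]
    simp

-- ===== VERDICT (by name: the statement is the Claim_ definition above) =====
theorem insert_IFs_depot_spec : Claim_equal_insert_IFs_depot := by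
  intro route if_arc depot _hdom hpre
  unfold Spec_insert_IFs_depot
  rcases hpre with ⟨hne, -, -⟩
  by_cases hlen : route.length ≤ 1
  · exact pv_small route if_arc depot hlen
  · obtain ⟨m, hm⟩ : ∃ m, route.length = m + 2 := ⟨route.length - 2, by omega⟩
    rw [pv_A_closed route if_arc depot hne m hm, pv_B_closed route if_arc depot hne m hm]
    rw [List.range_succ, List.map_append]
    simp [pvF]
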